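-- pv_equiv track=rewrite | github.com/anonymousvn912-del/SeFea_OODOD | utils/ID_OoD_Analysis/my_utils.py | collect_key_subkey_combined_layer_hook_names
-- ===== SOURCE A (Python) =====
-- def collect_key_subkey_combined_layer_hook_names(sample_value, combined_layer_hook_names):
--     key_subkey_combined_layer_hook_names = {}
--
--     for combined_layer_hook_name in combined_layer_hook_names:
--         key_subkey_combined_layer_hook_names[tuple(combined_layer_hook_name)] = []
--         for layer_hook_name in combined_layer_hook_name:
--             for key_sample_value in sample_value.keys():
--                 if layer_hook_name in sample_value[key_sample_value].keys():
--                     key_subkey_combined_layer_hook_names[tuple(combined_layer_hook_name)].append([key_sample_value, layer_hook_name])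
--                     break
--     return key_subkey_combined_layer_hook_names
-- ===== SOURCE B (Python) =====
-- def collect_key_subkey_combined_layer_hook_names(sample_value, combined_layer_hook_names):
--     # Precompute hook_name -> first key (in sample_value order) whose sub-dict contains it.
--     first_key = {}
--     for key, sub in sample_value.items():
--         for hook in sub:
--             first_key.setdefault(hook, key)
--     result = {}
--     for combined in combined_layer_hook_names:
--         result[tuple(combined)] = [[first_key[h], h] for h in combined if h in first_key]
--     return result
-- ===== Notes on version B (the rewrite author's own statement) =====
-- stated objective: faster
-- what changed: B precomputes one dict mapping each hook name to the first sample_value key whose sub-dict contains it (a single pass with setdefault), then builds each result entry by O(1) lookups, instead of A's rescan of all sample_value keys for every hook of every combined name.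
import Mathlib
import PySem

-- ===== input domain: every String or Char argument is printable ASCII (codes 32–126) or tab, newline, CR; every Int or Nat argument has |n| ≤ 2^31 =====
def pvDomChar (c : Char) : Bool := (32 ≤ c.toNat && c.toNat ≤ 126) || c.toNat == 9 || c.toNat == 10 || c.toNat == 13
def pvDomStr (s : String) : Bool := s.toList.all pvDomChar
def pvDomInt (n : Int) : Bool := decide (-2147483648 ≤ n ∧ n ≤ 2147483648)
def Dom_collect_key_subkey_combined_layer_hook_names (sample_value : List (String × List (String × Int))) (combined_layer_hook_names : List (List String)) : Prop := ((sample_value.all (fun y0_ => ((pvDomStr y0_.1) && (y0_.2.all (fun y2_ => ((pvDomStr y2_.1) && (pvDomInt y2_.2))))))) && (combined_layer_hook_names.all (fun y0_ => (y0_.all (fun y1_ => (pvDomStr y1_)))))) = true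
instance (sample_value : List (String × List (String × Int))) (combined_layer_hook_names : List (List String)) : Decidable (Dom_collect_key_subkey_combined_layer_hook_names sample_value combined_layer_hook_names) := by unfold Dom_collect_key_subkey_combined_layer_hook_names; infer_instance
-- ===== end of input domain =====

-- B precomputes a hook->first-containing-key dict once, replacing A's per-hook rescan of sample_value (faster, asymptotic).


-- ===== PORT A =====
-- inner 'for key_sample_value in sample_value.keys(): if layer_hook_name in sample_value[key].keys(): append; break'
def pvScanA (items : List (String × PySem.Dict String Int)) (hook : String)
    (c : List String) (d : PySem.Dict (List String) (List (List String))) :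
    PySem.Dict (List String) (List (List String)) :=
  match items with
  | [] => d
  | (k, sub) :: rest =>
    if sub.contains hook then d.insert c (d.getD c [] ++ [[k, hook]])  -- d[tuple(c)].append([k, hook])
    else pvScanA rest hook c d

def collect_key_subkey_combined_layer_hook_names (sample_value : List (String × List (String × Int))) (combined_layer_hook_names : List (List String)) : List (List String × List (List String)) :=
  -- sample_value is a Python dict of dicts: build the nested PySem.Dict at the boundary
  let svd : PySem.Dict String (PySem.Dict String Int) :=
    PySem.Dict.ofList (sample_value.map (fun p => (p.1, PySem.Dict.ofList p.2)))
  (combined_layer_hook_names.foldl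
    (fun d c =>
      c.foldl (fun d hook => pvScanA svd.items hook c d) (d.insert c []))
    PySem.Dict.empty).items

-- ===== PORT B =====
def collect_key_subkey_combined_layer_hook_names_alt (sample_value : List (String × List (String × Int))) (combined_layer_hook_names : List (List String)) : List (List String × List (List String)) :=
  let svd : PySem.Dict String (PySem.Dict String Int) :=
    PySem.Dict.ofList (sample_value.map (fun p => (p.1, PySem.Dict.ofList p.2)))
  -- first_key: for key, sub in sample_value.items(): for hook in sub: first_key.setdefault(hook, key)
  let fk : PySem.Dict String String :=
    svd.items.foldl (fun fk p => p.2.keys.foldl (fun fk h => fk.setdefault h p.1) fk)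
      PySem.Dict.empty
  (combined_layer_hook_names.foldl
    (fun res c =>
      res.insert c (c.filterMap (fun h => (fk.get? h).map (fun k => [k, h]))))
    PySem.Dict.empty).items

-- ===== PRECONDITION & SPEC =====
def Spec_collect_key_subkey_combined_layer_hook_names (sample_value : List (String × List (String × Int))) (combined_layer_hook_names : List (List String)) (out : List (List String × List (List String))) : Prop := out = collect_key_subkey_combined_layer_hook_names_alt sample_value combined_layer_hook_names
instance (sample_value : List (String × List (String × Int))) (combined_layer_hook_names : List (List String)) (out : List (List String × List (List String))) : Decidable (Spec_collect_key_subkey_combined_layer_hook_names sample_value combined_layer_hook_names out) := by unfold Spec_collect_key_subkey_combined_layer_hook_names; infer_instance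

-- ===== CLAIM (what is proved, stated in full; the proofs are below) =====
def Claim_equal_collect_key_subkey_combined_layer_hook_names : Prop := ∀ (sample_value : List (String × List (String × Int))) (combined_layer_hook_names : List (List String)), Dom_collect_key_subkey_combined_layer_hook_names sample_value combined_layer_hook_names → Spec_collect_key_subkey_combined_layer_hook_names sample_value combined_layer_hook_names (collect_key_subkey_combined_layer_hook_names sample_value combined_layer_hook_names)

-- ===== LEMMAS AND PROOFS =====

-- the first key of items whose sub-dict contains h (what both programs compute per hook)
def pvFind (items : List (String × PySem.Dict String Int)) (h : String) : Option String :=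
  match items with
  | [] => none
  | (k, sub) :: rest => if sub.contains h then some k else pvFind rest h

theorem pvSetdefault_fold_get? (ks : List String) (k : String) (fk : PySem.Dict String String) (h : String) :
    (ks.foldl (fun fk x => fk.setdefault x k) fk).get? h
      = ((fk.get? h).or (if h ∈ ks then some k else none)) := by
  induction ks generalizing fk with
  | nil => simp
  | cons x ks ih =>
    simp only [List.foldl_cons, ih]
    by_cases hx : h = x
    · subst hx
      rw [PySem.Dict.get?_setdefault_self]
      cases fk.get? h <;> simp
    · simp [PySem.Dict.get?_setdefault_of_ne, hx]

theorem pvFk_fold_get? (items : List (String × PySem.Dict String Int)) (fk : PySem.Dict String String) (h : String) :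
    (items.foldl (fun fk p => p.2.keys.foldl (fun fk x => fk.setdefault x p.1) fk) fk).get? h
      = ((fk.get? h).or (pvFind items h)) := by
  induction items generalizing fk with
  | nil => simp [pvFind]
  | cons p items ih =>
    obtain ⟨k, sub⟩ := p
    simp only [List.foldl_cons, ih, pvSetdefault_fold_get?]
    by_cases hc : sub.contains h
    · have hm : h ∈ sub.keys := (PySem.Dict.contains_iff_mem_keys _ _).mp hc
      simp only [pvFind, hc, if_true, hm]
      cases fk.get? h <;> simp
    · have hm : h ∉ sub.keys := fun m => hc ((PySem.Dict.contains_iff_mem_keys _ _).mpr m)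
      simp [pvFind, hc, hm]

theorem pvFk_get? (items : List (String × PySem.Dict String Int)) (h : String) :
    (items.foldl (fun fk p => p.2.keys.foldl (fun fk x => fk.setdefault x p.1) fk)
      PySem.Dict.empty).get? h = pvFind items h := by
  rw [pvFk_fold_get?]
  simp

theorem pvScanA_eq (items : List (String × PySem.Dict String Int)) (hook : String)
    (c : List String) (d : PySem.Dict (List String) (List (List String))) :
    pvScanA items hook c d
      = match pvFind items hook with
        | some k => d.insert c (d.getD c [] ++ [[k, hook]])
        | none => d := by
  induction items with
  | nil => simp [pvScanA, pvFind]
  | cons p rest ih =>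
    obtain ⟨k, sub⟩ := p
    by_cases hc : sub.contains hook <;> simp [pvScanA, pvFind, hc, ih]

theorem pvInnerA_eq (items : List (String × PySem.Dict String Int)) (hooks : List String)
    (c : List String) (d : PySem.Dict (List String) (List (List String))) (v : List (List String)) :
    hooks.foldl (fun d hook => pvScanA items hook c d) (d.insert c v)
      = d.insert c (v ++ hooks.filterMap (fun h => (pvFind items h).map (fun k => [k, h]))) := by
  induction hooks generalizing d v with
  | nil => simp
  | cons h hooks ih =>
    rw [List.foldl_cons, pvScanA_eq]
    cases hfind : pvFind items h with
    | none => simpa [hfind] using ih d v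
    | some k =>
      simp only [PySem.Dict.getD_insert_self, PySem.Dict.insert_insert_self]
      rw [ih]
      simp [hfind]

-- ===== VERDICT (by name: the statement is the Claim_ definition above) =====
theorem collect_key_subkey_combined_layer_hook_names_spec : Claim_equal_collect_key_subkey_combined_layer_hook_names := by
  intro sample_value combined_layer_hook_names _
  unfold Spec_collect_key_subkey_combined_layer_hook_names
  unfold collect_key_subkey_combined_layer_hook_names collect_key_subkey_combined_layer_hook_names_alt
  dsimp only
  congr 1
  generalize (PySem.Dict.ofList (sample_value.map (fun p => (p.1, PySem.Dict.ofList p.2)))) = svd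
  have hstep : ∀ (d : PySem.Dict (List String) (List (List String))) (c : List String),
      c.foldl (fun d hook => pvScanA svd.items hook c d) (d.insert c [])
        = d.insert c (c.filterMap (fun h =>
            (((svd.items.foldl (fun fk p => p.2.keys.foldl (fun fk x => fk.setdefault x p.1) fk)
              PySem.Dict.empty)).get? h).map (fun k => [k, h]))) := by
    intro d c
    rw [pvInnerA_eq]
    simp [pvFk_get?]
  have hall : ∀ (cl : List (List String)) (d : PySem.Dict (List String) (List (List String))),
      cl.foldl (fun d c => c.foldl (fun d hook => pvScanA svd.items hook c d) (d.insert c [])) d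
        = cl.foldl (fun res c =>
            res.insert c (c.filterMap (fun h =>
              (((svd.items.foldl (fun fk p => p.2.keys.foldl (fun fk x => fk.setdefault x p.1) fk)
                PySem.Dict.empty)).get? h).map (fun k => [k, h])))) d := by
    intro cl
    induction cl with
    | nil => intro d; rfl
    | cons c cl ih => intro d; rw [List.foldl_cons, List.foldl_cons, hstep, ih]
  exact hall _ _
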